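-- pv_equiv track=rewrite | github.com/ab-jiteshlalwani/EOS | eos_api/quantum_optimize_eos/views/quantum_optimize_view.py | add_negative_pairs
-- ===== SOURCE A (Python) =====
-- def add_negative_pairs(lst):
--     # base case: if the list is empty, return an empty list
--     if not lst:
--         return []
--
--     # if the first element is positive, keep it and recurse on the rest of the list
--     if lst[0] >= 0:
--         return [lst[0]] + add_negative_pairs(lst[1:])
--
--     # if the first two elements are negative, add them and recurse on the rest of the list
--     if len(lst) > 1 and lst[1] < 0:
--         return [lst[0] + lst[1]] + add_negative_pairs(lst[2:])
--
--     # if the first element is negative and the second is positive, keep the negative element and recurse on the rest of the list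
--     return [lst[0]] + add_negative_pairs(lst[1:])
-- ===== SOURCE B (Python) =====
-- def add_negative_pairs(lst):
--     res = []
--     n = len(lst)
--     i = 0
--     while i < n:
--         x = lst[i]
--         if x < 0 and i + 1 < n and lst[i + 1] < 0:
--             res.append(x + lst[i + 1])
--             i += 2
--         else:
--             res.append(x)
--             i += 1
--     return res
-- ===== Notes on version B (the rewrite author's own statement) =====
-- stated objective: faster
-- what changed: Replaced the recursive slice-and-concatenate scan (each step copies the tail and the result) with a single iterative index-based left-to-right pass appending to one result list.
import Mathlib
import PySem

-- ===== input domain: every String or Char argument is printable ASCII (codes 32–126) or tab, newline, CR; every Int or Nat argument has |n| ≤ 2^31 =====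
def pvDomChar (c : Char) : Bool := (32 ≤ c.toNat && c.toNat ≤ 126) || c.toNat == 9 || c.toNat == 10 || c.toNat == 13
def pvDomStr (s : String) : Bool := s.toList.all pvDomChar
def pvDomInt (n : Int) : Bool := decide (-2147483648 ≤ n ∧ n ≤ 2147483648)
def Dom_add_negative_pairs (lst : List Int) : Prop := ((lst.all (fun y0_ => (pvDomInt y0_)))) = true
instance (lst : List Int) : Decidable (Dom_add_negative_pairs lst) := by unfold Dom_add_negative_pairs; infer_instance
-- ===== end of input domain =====

-- B replaces A's recursive slice-and-concatenate scan by one iterative index pass (faster); return values are proved equal.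

-- ===== PORT A =====
-- literal transliteration of A's recursion: empty check, lst[0] >= 0, then the two negative cases
def add_negative_pairs (lst : List Int) : List Int :=
  match lst with
  | [] => []
  | x :: rest =>
    if x ≥ 0 then
      x :: add_negative_pairs rest
    else if rest.length > 0 ∧ rest.headD 0 < 0 then
      -- lst[0] + lst[1], recurse on lst[2:]
      (x + rest.headD 0) :: add_negative_pairs rest.tail
    else
      x :: add_negative_pairs rest
termination_by lst.length
decreasing_by all_goals simp [List.length_tail]

-- ===== PORT B =====
-- B's while loop: index i, result accumulator res
def add_negative_pairs_loop (lst : List Int) (n : Nat) (i : Nat) (res : List Int) : List Int :=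
  if _h : i < n then
    let x := lst.getD i 0
    if x < 0 ∧ i + 1 < n ∧ lst.getD (i + 1) 0 < 0 then
      add_negative_pairs_loop lst n (i + 2) (res ++ [x + lst.getD (i + 1) 0])
    else
      add_negative_pairs_loop lst n (i + 1) (res ++ [x])
  else res
termination_by n - i

def add_negative_pairs_alt (lst : List Int) : List Int :=
  add_negative_pairs_loop lst lst.length 0 []

-- ===== PRECONDITION & SPEC =====
def Spec_add_negative_pairs (lst : List Int) (out : List Int) : Prop := out = add_negative_pairs_alt lst
instance (lst : List Int) (out : List Int) : Decidable (Spec_add_negative_pairs lst out) := by unfold Spec_add_negative_pairs; infer_instance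

-- ===== CLAIM (what is proved, stated in full; the proofs are below) =====
def Claim_equal_add_negative_pairs : Prop := ∀ (lst : List Int), Dom_add_negative_pairs lst → Spec_add_negative_pairs lst (add_negative_pairs lst)

-- ===== LEMMAS AND PROOFS =====

-- unfolding equations for the A port
theorem A_nonneg (x : Int) (rest : List Int) (h : x ≥ 0) :
    add_negative_pairs (x :: rest) = x :: add_negative_pairs rest := by
  rw [add_negative_pairs]; simp [h]

theorem A_negneg (x y : Int) (rest : List Int) (hx : ¬ x ≥ 0) (hy : y < 0) :
    add_negative_pairs (x :: y :: rest) = (x + y) :: add_negative_pairs rest := by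
  rw [add_negative_pairs]; simp [hx, hy]

theorem A_negpos (x y : Int) (rest : List Int) (hx : ¬ x ≥ 0) (hy : ¬ y < 0) :
    add_negative_pairs (x :: y :: rest) = x :: add_negative_pairs (y :: rest) := by
  rw [add_negative_pairs]; simp [hx, hy]

theorem A_single_neg (x : Int) (hx : ¬ x ≥ 0) :
    add_negative_pairs [x] = [x] := by
  rw [add_negative_pairs]; simp [hx]; rw [add_negative_pairs]

-- the loop at index i produces res ++ A (lst.drop i)
theorem add_negative_pairs_loop_eq (lst : List Int) (i : Nat) (res : List Int) :
    add_negative_pairs_loop lst lst.length i res = res ++ add_negative_pairs (lst.drop i) := by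
  induction hfuel : lst.length - i using Nat.strong_induction_on generalizing i res with
  | _ fuel ih =>
    rw [add_negative_pairs_loop]
    by_cases hi : i < lst.length
    · have hdrop : lst.drop i = lst[i] :: lst.drop (i + 1) := List.drop_eq_getElem_cons hi
      have hgd : lst.getD i 0 = lst[i] := List.getD_eq_getElem lst 0 hi
      simp only [hi, dif_pos, hgd]
      by_cases hx : lst[i] < 0
      · by_cases hi1 : i + 1 < lst.length
        · have hdrop1 : lst.drop (i + 1) = lst[i+1] :: lst.drop (i + 2) :=
            List.drop_eq_getElem_cons hi1
          have hgd1 : lst.getD (i+1) 0 = lst[i+1] := List.getD_eq_getElem lst 0 hi1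
          by_cases hy : lst[i+1] < 0
          · rw [if_pos (by rw [hgd1]; exact ⟨hx, hi1, hy⟩)]
            rw [ih (lst.length - (i + 2)) (by omega) (i + 2) _ rfl]
            rw [hdrop, hdrop1, A_negneg _ _ _ (by omega) hy, hgd1, List.append_assoc,
              List.singleton_append]
          · rw [if_neg (by rw [hgd1]; omega)]
            rw [ih (lst.length - (i + 1)) (by omega) (i + 1) _ rfl]
            rw [hdrop]
            conv_rhs => rw [hdrop1]
            rw [A_negpos _ _ _ (by omega) hy, ← hdrop1, List.append_assoc,
              List.singleton_append]
        · rw [if_neg (by omega)]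
          rw [ih (lst.length - (i + 1)) (by omega) (i + 1) _ rfl]
          have hnil : lst.drop (i + 1) = [] := List.drop_eq_nil_of_le (by omega)
          rw [hdrop, hnil, A_single_neg _ (by omega), add_negative_pairs,
            List.append_assoc, List.singleton_append]
      · rw [if_neg (by omega)]
        rw [ih (lst.length - (i + 1)) (by omega) (i + 1) _ rfl]
        rw [hdrop, A_nonneg _ _ (by omega), List.append_assoc, List.singleton_append]
    · have hnil : lst.drop i = [] := List.drop_eq_nil_of_le (by omega)
      rw [dif_neg hi, hnil, add_negative_pairs, List.append_nil]

-- ===== VERDICT (by name: the statement is the Claim_ definition above) =====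
theorem add_negative_pairs_spec : Claim_equal_add_negative_pairs := by
  intro lst _
  unfold Spec_add_negative_pairs add_negative_pairs_alt
  rw [add_negative_pairs_loop_eq]
  simp
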